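-- pv_equiv track=rewrite | github.com/Franccisco/code-jam-6 | amphibian-alchemists/discord-postal-service/flask_server/dps/views.py | num_encode
-- ===== SOURCE A (Python) =====
-- import string
--
-- ALPHABET = string.ascii_uppercase + string.digits + string.ascii_lowercase + "-_"
--
-- BASE = len(ALPHABET)
--
-- SIGN_CHARACTER = "$"
--
-- def num_encode(n):
--     if n < 0:
--         return SIGN_CHARACTER + num_encode(-n)
--     s = []
--     while True:
--         n, r = divmod(n, BASE)
--         s.append(ALPHABET[r])
--         if n == 0:
--             break
--     return "".join(reversed(s))
-- ===== SOURCE B (Python) =====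
-- import string
--
-- ALPHABET = string.ascii_uppercase + string.digits + string.ascii_lowercase + "-_"
-- BASE = len(ALPHABET)
-- SIGN_CHARACTER = "$"
--
--
-- def num_encode(n):
--     if n < 0:
--         return SIGN_CHARACTER + num_encode(-n)
--     if n < BASE:
--         return ALPHABET[n]
--     return num_encode(n // BASE) + ALPHABET[n % BASE]
-- ===== Notes on version B (the rewrite author's own statement) =====
-- stated objective: simpler
-- what changed: Replaced the accumulate-digits-then-reverse while loop with a direct recursion on the quotient (base case n < 64 returns one character, otherwise recurse on n // 64 and append the low digit), eliminating the list/reverse machinery.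
import Mathlib
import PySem

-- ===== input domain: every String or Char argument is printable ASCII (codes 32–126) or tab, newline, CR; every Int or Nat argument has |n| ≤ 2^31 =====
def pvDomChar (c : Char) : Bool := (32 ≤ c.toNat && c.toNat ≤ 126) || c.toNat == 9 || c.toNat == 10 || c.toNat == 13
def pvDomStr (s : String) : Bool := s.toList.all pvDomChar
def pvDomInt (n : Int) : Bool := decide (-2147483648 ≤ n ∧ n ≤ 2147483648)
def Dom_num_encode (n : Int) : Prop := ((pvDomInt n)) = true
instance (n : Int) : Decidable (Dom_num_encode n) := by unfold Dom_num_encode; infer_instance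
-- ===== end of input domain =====

-- B replaces A's accumulate-digits-then-reverse while loop by a direct recursion on the quotient; same outputs.

-- shared constant: the 64-character alphabet (A-Z, 0-9, a-z, '-', '_')
def pvAlpha : List Char :=
  "ABCDEFGHIJKLMNOPQRSTUVWXYZ0123456789abcdefghijklmnopqrstuvwxyz-_".toList

-- ALPHABET[r] as one character; every index passed to it is n % 64 (or n < 64 itself), always in [0, 64), so the default is never used
def pvAlphaChar (r : Nat) : Char := pvAlpha.getD r ' '

-- ===== PORT A =====
-- A's while loop. It only ever runs on the nonnegative branch, where Python's
-- divmod(n, 64) coincides with Nat division/remainder, so the loop state is a Nat.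
def numEncLoopA : Nat → List Char → List Char
  | n, s =>
    if n / 64 = 0 then s ++ [pvAlphaChar (n % 64)]
    else numEncLoopA (n / 64) (s ++ [pvAlphaChar (n % 64)])
  termination_by n _ => n
  decreasing_by
    exact Nat.div_lt_self (by omega) (by omega)

def num_encode (n : Int) : String :=
  if n < 0 then "$" ++ num_encode (-n)
  else String.ofList ((numEncLoopA n.toNat []).reverse)
  termination_by if n < 0 then 1 else 0
  decreasing_by
    rename_i h
    simp only [if_pos h, if_neg (by omega : ¬ -n < 0)]
    omega

-- ===== PORT B =====
def num_encode_alt (n : Int) : String :=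
  if n < 0 then "$" ++ num_encode_alt (-n)
  else if n < 64 then String.ofList [pvAlphaChar n.toNat]
  else num_encode_alt (PySem.Int.floordiv n 64) ++ String.ofList [pvAlphaChar (PySem.Int.mod n 64).toNat]
  termination_by 2 * n.natAbs + (if n < 0 then 1 else 0)
  decreasing_by
    · rename_i h
      simp only [if_pos h, if_neg (by omega : ¬ -n < 0)]
      omega
    · rename_i h1 h2
      rw [PySem.Int.floordiv_eq_ediv_of_pos (by omega)]
      split_ifs <;> omega

-- ===== PRECONDITION & SPEC =====
def Spec_num_encode (n : Int) (out : String) : Prop := out = num_encode_alt n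
instance (n : Int) (out : String) : Decidable (Spec_num_encode n out) := by unfold Spec_num_encode; infer_instance

-- ===== CLAIM (what is proved, stated in full; the proofs are below) =====
def Claim_equal_num_encode : Prop := ∀ (n : Int), Dom_num_encode n → Spec_num_encode n (num_encode n)

-- ===== LEMMAS AND PROOFS =====

lemma numEncLoopA_append (n : Nat) (s : List Char) :
    numEncLoopA n s = s ++ numEncLoopA n [] := by
  induction n using Nat.strong_induction_on generalizing s with
  | _ n ih =>
    rw [numEncLoopA.eq_1 n s, numEncLoopA.eq_1 n []]
    simp only [List.nil_append]
    by_cases h : n / 64 = 0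
    · rw [if_pos h, if_pos h]
    · rw [if_neg h, if_neg h,
        ih (n / 64) (Nat.div_lt_self (by omega) (by omega)) (s ++ [pvAlphaChar (n % 64)]),
        ih (n / 64) (Nat.div_lt_self (by omega) (by omega)) [pvAlphaChar (n % 64)],
        List.append_assoc]

lemma digits_eq (n : Nat) :
    String.ofList (numEncLoopA n []).reverse = num_encode_alt (n : Int) := by
  induction n using Nat.strong_induction_on with
  | _ n ih =>
    rw [num_encode_alt, numEncLoopA.eq_1 n []]
    simp only [List.nil_append]
    rw [if_neg (by exact_mod_cast Int.not_lt.mpr (Int.natCast_nonneg n) : ¬ ((n : Nat) : Int) < 0)]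
    by_cases h : n < 64
    · have hq : n / 64 = 0 := Nat.div_eq_of_lt h
      have h' : ((n : Nat) : Int) < 64 := by exact_mod_cast h
      rw [if_pos hq, if_pos h', Nat.mod_eq_of_lt h]
      simp
    · have hq : ¬ n / 64 = 0 := by omega
      have h' : ¬ ((n : Nat) : Int) < 64 := by exact_mod_cast h
      have h1 : PySem.Int.floordiv (n : Int) 64 = ((n / 64 : Nat) : Int) := by
        exact_mod_cast PySem.Int.floordiv_natCast n 64
      have h2 : PySem.Int.mod (n : Int) 64 = ((n % 64 : Nat) : Int) := by
        exact_mod_cast PySem.Int.mod_natCast n 64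
      rw [if_neg hq, if_neg h', h1, h2, Int.toNat_natCast,
        ← ih (n / 64) (Nat.div_lt_self (by omega) (by omega)),
        numEncLoopA_append, List.reverse_append, String.ofList_append]
      simp

lemma key_eq (m : Nat) : num_encode (m : Int) = num_encode_alt (m : Int) := by
  rw [num_encode,
    if_neg (by exact_mod_cast Int.not_lt.mpr (Int.natCast_nonneg m) : ¬ ((m : Nat) : Int) < 0),
    Int.toNat_natCast]
  exact digits_eq m

lemma enc_eq (n : Int) : num_encode n = num_encode_alt n := by
  by_cases h : n < 0
  · rw [num_encode, num_encode_alt, if_pos h, if_pos h]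
    have hm : -n = (((-n).toNat : Nat) : Int) := by omega
    rw [hm, key_eq]
  · have hm : n = ((n.toNat : Nat) : Int) := by omega
    rw [hm, key_eq]

-- ===== VERDICT (by name: the statement is the Claim_ definition above) =====
theorem num_encode_spec : Claim_equal_num_encode := by
  intro n _
  exact enc_eq n
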